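-- pv_equiv track=rewrite | github.com/Likelion-HUFS-10th/Algorithm | 2팀/최유정/DFS와 BFS/0526_타겟넘버.py | solution
-- ===== SOURCE A (Python) =====
-- from collections import deque
--
-- def solution(numbers, target):
--     answer = 0
--     queue = deque()
--     queue.append(0)
--     for num in numbers:
--         for _ in range(len(queue)):
--             result = queue.popleft()
--             queue.append(result + num)
--             queue.append(result - num)
--     for i in queue:
--         if i == target:
--             answer += 1
--     return answer
-- ===== SOURCE B (Python) =====
-- def solution(numbers, target):
--     counts = {0: 1}
--     for num in numbers:
--         nxt = {}
--         for s, c in counts.items():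
--             nxt[s + num] = nxt.get(s + num, 0) + c
--             nxt[s - num] = nxt.get(s - num, 0) + c
--         counts = nxt
--     return counts.get(target, 0)
-- ===== Notes on version B (the rewrite author's own statement) =====
-- stated objective: faster
-- what changed: Replaces the BFS queue that materialises all 2^n signed sums with a dynamic-programming dict mapping each achievable sum to its number of sign assignments, updated once per number.
import Mathlib
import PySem

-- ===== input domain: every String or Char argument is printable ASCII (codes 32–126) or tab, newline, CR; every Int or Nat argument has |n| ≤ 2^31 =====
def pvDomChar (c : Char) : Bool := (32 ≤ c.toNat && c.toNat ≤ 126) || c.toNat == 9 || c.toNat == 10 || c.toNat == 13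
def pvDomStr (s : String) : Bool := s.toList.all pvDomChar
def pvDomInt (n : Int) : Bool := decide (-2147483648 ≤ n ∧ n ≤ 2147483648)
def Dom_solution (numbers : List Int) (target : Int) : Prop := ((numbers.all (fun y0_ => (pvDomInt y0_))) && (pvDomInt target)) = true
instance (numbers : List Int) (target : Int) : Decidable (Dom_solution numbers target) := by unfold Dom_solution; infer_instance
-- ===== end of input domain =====

-- B replaces A's breadth-first queue of all 2^n signed sums by a dict counting sign assignments per achievable sum (faster: asymptotic).

-- ===== PORT A =====
-- inner loop 'for _ in range(len(queue)): result = queue.popleft(); queue.append(result+num); queue.append(result-num)'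
-- (k = number of iterations left; popleft on a nonempty deque is taking the head; never hits [] since k starts at the length)
def solInnerLoop : Nat → List Int → Int → List Int
  | 0, q, _ => q
  | Nat.succ k, q, num =>
    match q with
    | [] => []
    | r :: rest => solInnerLoop k (rest ++ [r + num, r - num]) num

def solution (numbers : List Int) (target : Int) : Int :=
  let queue := numbers.foldl (fun q num => solInnerLoop q.length q num) [0]
  queue.foldl (fun answer i => if i == target then answer + 1 else answer) 0

-- ===== PORT B =====
-- 'nxt[s+num] = nxt.get(s+num, 0) + c; nxt[s-num] = nxt.get(s-num, 0) + c' for (s, c) in counts.items()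
def solDpStep (counts : PySem.Dict Int Int) (num : Int) : PySem.Dict Int Int :=
  counts.items.foldl
    (fun nxt p =>
      let n1 := nxt.insert (p.1 + num) (nxt.getD (p.1 + num) 0 + p.2)
      n1.insert (p.1 - num) (n1.getD (p.1 - num) 0 + p.2))
    PySem.Dict.empty

def solution_alt (numbers : List Int) (target : Int) : Int :=
  let counts := numbers.foldl solDpStep (PySem.Dict.empty.insert 0 1)
  counts.getD target 0

-- ===== PRECONDITION & SPEC =====
def Spec_solution (numbers : List Int) (target : Int) (out : Int) : Prop := out = solution_alt numbers target
instance (numbers : List Int) (target : Int) (out : Int) : Decidable (Spec_solution numbers target out) := by unfold Spec_solution; infer_instance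

-- ===== CLAIM (what is proved, stated in full; the proofs are below) =====
def Claim_equal_solution : Prop := ∀ (numbers : List Int) (target : Int), Dom_solution numbers target → Spec_solution numbers target (solution numbers target)

-- ===== LEMMAS AND PROOFS =====

-- the signed-sums expansion of one number
def solExpand (num : Int) (r : Int) : List Int := [r + num, r - num]

-- A's inner loop processes the first k elements of the queue, appending their two successors
lemma solInnerLoop_spec (p s : List Int) (num : Int) :
    solInnerLoop p.length (p ++ s) num = s ++ p.flatMap (solExpand num) := by
  induction p generalizing s with
  | nil => simp [solInnerLoop]
  | cons r p ih =>
      have := ih (s ++ [r + num, r - num])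
      simpa [solInnerLoop, solExpand, List.append_assoc] using this

-- invariant relating B's dict to A's queue
def solRel (L : List Int) (d : PySem.Dict Int Int) : Prop :=
  (∀ t, d.getD t 0 = (L.count t : Int)) ∧ d.keys.Nodup ∧ (∀ t, t ∈ d.keys ↔ t ∈ L)

-- value of B's inner fold: the old value plus the contribution of each processed pair
lemma solDpFold_getD (ps : List (Int × Int)) (nxt : PySem.Dict Int Int) (num t : Int) :
    (ps.foldl
      (fun nxt p =>
        let n1 := nxt.insert (p.1 + num) (nxt.getD (p.1 + num) 0 + p.2)
        n1.insert (p.1 - num) (n1.getD (p.1 - num) 0 + p.2))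
      nxt).getD t 0
    = nxt.getD t 0
      + (ps.map (fun p => (if p.1 + num = t then p.2 else 0) + (if p.1 - num = t then p.2 else 0))).sum := by
  induction ps generalizing nxt with
  | nil => simp
  | cons p ps ih =>
      simp only [List.foldl_cons, List.map_cons, List.sum_cons, ih]
      simp only [PySem.Dict.getD_insert]
      generalize p.1 + num = a
      generalize p.1 - num = b
      split_ifs <;> subst_vars <;> omega

-- keys produced by B's inner fold
lemma solDpFold_mem_keys (ps : List (Int × Int)) (nxt : PySem.Dict Int Int) (num t : Int) :
    t ∈ (ps.foldl
      (fun nxt p =>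
        let n1 := nxt.insert (p.1 + num) (nxt.getD (p.1 + num) 0 + p.2)
        n1.insert (p.1 - num) (n1.getD (p.1 - num) 0 + p.2))
      nxt).keys
    ↔ t ∈ nxt.keys ∨ ∃ p ∈ ps, t = p.1 + num ∨ t = p.1 - num := by
  induction ps generalizing nxt with
  | nil => simp
  | cons p ps ih =>
      simp only [List.foldl_cons, ih, PySem.Dict.mem_keys_insert, List.mem_cons]
      constructor
      · rintro ((h | h | h) | ⟨q, hq, h⟩)
        · exact Or.inr ⟨p, Or.inl rfl, Or.inr h⟩
        · exact Or.inr ⟨p, Or.inl rfl, Or.inl h⟩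
        · exact Or.inl h
        · exact Or.inr ⟨q, Or.inr hq, h⟩
      · rintro (h | ⟨q, rfl | hq, h | h⟩)
        · exact Or.inl (Or.inr (Or.inr h))
        · exact Or.inl (Or.inr (Or.inl h))
        · exact Or.inl (Or.inl h)
        · exact Or.inr ⟨q, hq, Or.inl h⟩
        · exact Or.inr ⟨q, hq, Or.inr h⟩

-- the inner fold keeps keys unique
lemma solDpFold_nodup (ps : List (Int × Int)) (nxt : PySem.Dict Int Int) (num : Int)
    (h : nxt.keys.Nodup) :
    (ps.foldl
      (fun nxt p =>
        let n1 := nxt.insert (p.1 + num) (nxt.getD (p.1 + num) 0 + p.2)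
        n1.insert (p.1 - num) (n1.getD (p.1 - num) 0 + p.2))
      nxt).keys.Nodup := by
  induction ps generalizing nxt with
  | nil => exact h
  | cons p ps ih => exact ih _ (PySem.Dict.nodup_keys_insert _ _ _ (PySem.Dict.nodup_keys_insert _ _ _ h))

-- count of a value in the flatMap expansion, as an Int sum
lemma count_flatMap_expand (L : List Int) (num t : Int) :
    ((L.flatMap (solExpand num)).count t : Int)
    = (L.map (fun r => ((if r + num = t then 1 else 0) + (if r - num = t then 1 else 0) : Int))).sum := by
  induction L with
  | nil => simp
  | cons r L ih =>
      simp only [List.flatMap_cons, List.count_append, List.map_cons, List.sum_cons, ← ih,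
        solExpand]
      by_cases h1 : r + num = t <;> by_cases h2 : r - num = t <;>
        simp [List.count_cons, List.count_nil, h1, h2]

-- grouping: a sum over a nodup key list weighted by multiplicities equals the plain sum over L
lemma sum_group (L K : List Int) (hnd : K.Nodup) (hm : ∀ x, x ∈ K ↔ x ∈ L) (g : Int → Int) :
    (K.map (fun s => (L.count s : Int) * g s)).sum = (L.map g).sum := by
  have hK : (K.map (fun s => (L.count s : Int) * g s)).sum
      = ∑ s ∈ K.toFinset, (L.count s : Int) * g s := by
    rw [Finset.sum_list_map_count]
    refine Finset.sum_congr rfl (fun s hs => ?_)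
    rw [List.count_eq_one_of_mem hnd (List.mem_toFinset.mp hs), one_smul]
  have hset : K.toFinset = L.toFinset := by
    ext x; simp [hm x]
  rw [hK, hset, Finset.sum_list_map_count]
  refine Finset.sum_congr rfl (fun s _ => ?_)
  rw [nsmul_eq_mul]

-- one DP step preserves the invariant
lemma solRel_step (L : List Int) (d : PySem.Dict Int Int) (num : Int) (h : solRel L d) :
    solRel (L.flatMap (solExpand num)) (solDpStep d num) := by
  obtain ⟨hval, hnd, hmem⟩ := h
  have hitems : d.items = d.keys.map (fun k => (k, d.getD k 0)) :=
    PySem.Dict.items_eq_map_keys d hnd 0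
  refine ⟨?_, ?_, ?_⟩
  · intro t
    rw [solDpStep, solDpFold_getD, hitems, List.map_map]
    have : ((fun p : Int × Int => (if p.1 + num = t then p.2 else 0) + (if p.1 - num = t then p.2 else 0))
        ∘ fun k => (k, d.getD k 0))
        = fun s => (L.count s : Int) * ((if s + num = t then 1 else 0) + (if s - num = t then 1 else 0)) := by
      funext s
      simp only [Function.comp, hval s]
      split_ifs <;> ring
    rw [this, sum_group L d.keys hnd hmem, count_flatMap_expand]
    simp
  · exact solDpFold_nodup _ _ _ PySem.Dict.nodup_keys_empty
  · intro t
    rw [solDpStep, solDpFold_mem_keys]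
    simp only [PySem.Dict.keys_empty, List.not_mem_nil, false_or, List.mem_flatMap, hitems]
    constructor
    · rintro ⟨p, hp, h⟩
      simp only [List.mem_map] at hp
      obtain ⟨k, hk, rfl⟩ := hp
      exact ⟨k, (hmem k).mp hk, by rcases h with h | h <;> simp [solExpand, h]⟩
    · rintro ⟨r, hr, h⟩
      refine ⟨(r, d.getD r 0), List.mem_map.mpr ⟨r, (hmem r).mpr hr, rfl⟩, ?_⟩
      simpa [solExpand, eq_comm] using h

-- the invariant holds between the two main folds
lemma solRel_fold (numbers : List Int) :
    solRel (numbers.foldl (fun q num => solInnerLoop q.length q num) [0])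
      (numbers.foldl solDpStep (PySem.Dict.empty.insert 0 1)) := by
  induction numbers using List.reverseRecOn with
  | nil =>
      refine ⟨fun t => ?_, ?_, fun t => ?_⟩
      · by_cases h : t = (0 : Int)
        · simp [h, List.count_cons]
        · simp [PySem.Dict.getD_insert, PySem.Dict.getD_empty, h, List.count_nil, Ne.symm h]
      · simpa using PySem.Dict.nodup_keys_insert _ _ _ PySem.Dict.nodup_keys_empty
      · simp [PySem.Dict.mem_keys_insert]
  | append_singleton ns num ih =>
      simp only [List.foldl_append, List.foldl_cons, List.foldl_nil]
      have hstep := solRel_step _ _ num ih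
      have hq : solInnerLoop
          (ns.foldl (fun q num => solInnerLoop q.length q num) [0]).length
          (ns.foldl (fun q num => solInnerLoop q.length q num) [0]) num
          = (ns.foldl (fun q num => solInnerLoop q.length q num) [0]).flatMap (solExpand num) := by
        have := solInnerLoop_spec (ns.foldl (fun q num => solInnerLoop q.length q num) [0]) [] num
        simpa using this
      rw [hq]
      exact hstep

-- ===== VERDICT (by name: the statement is the Claim_ definition above) =====
theorem solution_spec : Claim_equal_solution := by
  intro numbers target _
  unfold Spec_solution solution solution_alt
  obtain ⟨hval, _, _⟩ := solRel_fold numbers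
  rw [PySem.List.foldl_count_if, hval target]
  norm_num [List.count]
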